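-- pv_equiv track=rewrite | github.com/valinux/TimePad_Spying | uwn2.py | numbers_to_text
-- ===== SOURCE A (Python) =====
-- def numbers_to_text(numeric_message, mapping):
--     """Convert a numeric message back to text using the word-to-number mapping."""
--     inverted_mapping = {v: k for k, v in mapping.items()}  # Invert mapping
--     words = []
--
--     # Split numeric message into chunks of 4 digits
--     for i in range(0, len(numeric_message), 4):
--         number = numeric_message[i:i+4]
--         word = inverted_mapping.get(number, '')
--         if word:
--             words.append(word)
--
--     return ' '.join(words)
-- ===== SOURCE B (Python) =====
-- def numbers_to_text(numeric_message, mapping):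
--     """Decode by an outer sweep over the mapping: split the message into 4-char chunks,
--     group the chunk positions by chunk once, then write each mapping pair's word into
--     every slot holding its number (later pairs overwrite), and join the non-empty slots."""
--     chunks = [numeric_message[i:i+4] for i in range(0, len(numeric_message), 4)]
--     positions = {}
--     for idx, ch in enumerate(chunks):
--         positions.setdefault(ch, []).append(idx)
--     slots = [''] * len(chunks)
--     for k, v in mapping.items():
--         for idx in positions.get(v, []):
--             slots[idx] = k
--     return ' '.join(w for w in slots if w)
-- ===== Notes on version B (the rewrite author's own statement) =====
-- stated objective: alternative
-- what changed: B inverts the traversal: instead of building an inverted dict and looking each chunk up, it groups the chunk positions once, allocates one slot per chunk, and makes a single outer sweep over the mapping writing each pair's word into the slots of its value (later pairs overwrite), then joins the non-empty slots.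
import Mathlib
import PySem

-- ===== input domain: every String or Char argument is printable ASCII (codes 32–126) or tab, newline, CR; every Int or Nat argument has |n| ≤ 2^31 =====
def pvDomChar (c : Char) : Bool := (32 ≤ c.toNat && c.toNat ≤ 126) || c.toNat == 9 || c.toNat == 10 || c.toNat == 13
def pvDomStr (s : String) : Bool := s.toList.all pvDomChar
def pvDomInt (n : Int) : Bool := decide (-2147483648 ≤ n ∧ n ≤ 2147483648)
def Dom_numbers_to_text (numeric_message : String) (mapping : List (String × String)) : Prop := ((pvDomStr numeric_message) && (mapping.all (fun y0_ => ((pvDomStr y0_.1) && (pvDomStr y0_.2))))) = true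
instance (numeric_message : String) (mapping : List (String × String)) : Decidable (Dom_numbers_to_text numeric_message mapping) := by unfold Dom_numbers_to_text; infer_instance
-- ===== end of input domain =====

-- B inverts the traversal: group chunk positions once, then a single outer sweep over the
-- mapping writes each word into the slots of its number (later pairs overwrite); no inverted dict.

-- ===== PORT A =====
def numbers_to_text (numeric_message : String) (mapping : List (String × String)) : String :=
  -- inverted_mapping = {v: k for k, v in mapping.items()}
  let inverted : PySem.Dict String String :=
    mapping.foldl (fun d p => d.insert p.2 p.1) PySem.Dict.empty
  let cs := numeric_message.toList
  -- for i in range(0, len(numeric_message), 4): …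
  let words : List String :=
    (PySem.List.pyRange 0 (cs.length : Int) 4).foldl
      (fun ws i =>
        let number := String.ofList (PySem.List.slice cs (some i) (some (i + 4)))
        let word := inverted.getD number ""
        if word ≠ "" then ws ++ [word] else ws)
      []
  PySem.Str.join " " words

-- ===== PORT B =====
def numbers_to_text_alt (numeric_message : String) (mapping : List (String × String)) : String :=
  let cs := numeric_message.toList
  -- chunks = [numeric_message[i:i+4] for i in range(0, len(numeric_message), 4)]
  let chunks : List String :=
    (PySem.List.pyRange 0 (cs.length : Int) 4).map
      (fun i => String.ofList (PySem.List.slice cs (some i) (some (i + 4))))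
  -- positions = {}; for idx, ch in enumerate(chunks): positions.setdefault(ch, []).append(idx)
  let positions : PySem.Dict String (List Int) :=
    (PySem.List.enumerate chunks 0).foldl
      (fun d q => d.insert q.2 (d.getD q.2 [] ++ [q.1])) PySem.Dict.empty
  -- slots = [''] * len(chunks)
  let slots0 : List String := List.replicate chunks.length ""
  -- for k, v in mapping.items(): for idx in positions.get(v, []): slots[idx] = k
  -- (every idx produced by enumerate is a valid nonnegative index, so .toNat is exact here)
  let slots : List String :=
    mapping.foldl
      (fun sl p => (positions.getD p.2 []).foldl (fun s2 idx => s2.set idx.toNat p.1) sl)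
      slots0
  -- ' '.join(w for w in slots if w)
  PySem.Str.join " " (slots.filter (fun w => w ≠ ""))

-- ===== PRECONDITION & SPEC =====
def Spec_numbers_to_text (numeric_message : String) (mapping : List (String × String)) (out : String) : Prop := out = numbers_to_text_alt numeric_message mapping
instance (numeric_message : String) (mapping : List (String × String)) (out : String) : Decidable (Spec_numbers_to_text numeric_message mapping out) := by unfold Spec_numbers_to_text; infer_instance

-- ===== CLAIM =====
def Claim_equal_numbers_to_text : Prop := ∀ (numeric_message : String) (mapping : List (String × String)), Dom_numbers_to_text numeric_message mapping → Spec_numbers_to_text numeric_message mapping (numbers_to_text numeric_message mapping)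

-- ===== LEMMAS AND PROOFS =====

/-- The inverted-dict lookup (last insert wins) equals the last-match scan of the mapping. -/
theorem getD_invert_eq_scan (mapping : List (String × String)) (d : PySem.Dict String String) (c : String) :
    (mapping.foldl (fun d p => d.insert p.2 p.1) d).getD c "" =
      mapping.foldl (fun w p => if p.2 = c then p.1 else w) (d.getD c "") := by
  induction mapping generalizing d with
  | nil => rfl
  | cons hd t ih =>
      rw [List.foldl_cons, List.foldl_cons, ih, PySem.Dict.getD_insert]
      by_cases h : hd.2 = c
      · simp [h]
      · rw [if_neg (fun hc => h hc.symm), if_neg h]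

/-- The setdefault/append grouping dict holds, under each key, exactly the first components
of the processed pairs whose second component is that key, in order. -/
theorem getD_group_eq_filter (l : List (Int × String)) (d : PySem.Dict String (List Int)) (c : String) :
    (l.foldl (fun d q => d.insert q.2 (d.getD q.2 [] ++ [q.1])) d).getD c [] =
      d.getD c [] ++ (l.filter (fun q => q.2 = c)).map (·.1) := by
  induction l generalizing d with
  | nil => simp
  | cons hd t ih =>
      rw [List.foldl_cons, List.filter_cons, ih, PySem.Dict.getD_insert]
      by_cases h : hd.2 = c
      · simp [h]
      · rw [if_neg (fun hc => h hc.symm), if_neg (by simpa using h)]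

/-- Element of a fold of `set`s writing the same value `k` at the indices of `L`. -/
theorem getElem?_foldl_set (L : List Int) (k : String) (sl : List String) (i : Nat) :
    (L.foldl (fun s idx => s.set idx.toNat k) sl)[i]? =
      if (∃ j ∈ L, j.toNat = i) ∧ i < sl.length then some k else sl[i]? := by
  induction L generalizing sl with
  | nil => simp
  | cons j L' ih =>
      rw [List.foldl_cons, ih, List.length_set, List.getElem?_set]
      by_cases hL : ∃ j' ∈ L', j'.toNat = i <;> by_cases hji : j.toNat = i <;>
        by_cases hi : i < sl.length <;> simp_all

/-- Writing `k` into every slot whose chunk equals `v` (via the grouped index list)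
is the pointwise update of the slot list. -/
theorem write_positions_eq_map (chunks : List String) (g : String → String) (v k : String) :
    ((((PySem.List.enumerate chunks 0).filter (fun q => q.2 = v)).map (·.1)).foldl
        (fun s idx => s.set idx.toNat k) (chunks.map g)) =
      chunks.map (fun ch => if ch = v then k else g ch) := by
  apply List.ext_getElem?
  intro i
  rw [getElem?_foldl_set, List.length_map]
  have hmem : (∃ j ∈ ((PySem.List.enumerate chunks 0).filter (fun q => q.2 = v)).map (·.1), j.toNat = i) ↔ (i < chunks.length ∧ ∃ h : i < chunks.length, chunks[i] = v) := by
    constructor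
    · rintro ⟨j, hj, rfl⟩
      rcases List.mem_map.mp hj with ⟨q, hq, rfl⟩
      have h2 := (List.mem_filter.mp hq).2
      rcases (PySem.List.mem_enumerate_iff _ _ _).mp (List.mem_filter.mp hq).1 with ⟨kk, hkk, hq2⟩
      subst hq2
      simp_all
    · rintro ⟨hi, hi', hv⟩
      exact ⟨(i : Int), List.mem_map.mpr ⟨((i : Int), chunks[i]),
        List.mem_filter.mpr ⟨(PySem.List.mem_enumerate_iff _ _ _).mpr ⟨i, hi, by simp⟩, by simpa using hv⟩, rfl⟩,
        Int.toNat_natCast i⟩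
  by_cases hi : i < chunks.length
  · by_cases hv : chunks[i] = v
    · rw [if_pos ⟨hmem.mpr ⟨hi, hi, hv⟩, hi⟩]
      simp [hi, hv]
    · rw [if_neg (fun h => hv ((hmem.mp h.1).2.2))]
      simp [hi, hv]
  · rw [if_neg (fun h => hi h.2)]
    simp [Nat.le_of_not_lt hi]

/-- B's mapping sweep leaves each slot holding the last-match scan for its chunk. -/
theorem sweep_eq_map_scan (mapping : List (String × String)) (chunks : List String)
    (g : String → String) :
    mapping.foldl
      (fun sl p => ((((PySem.List.enumerate chunks 0).filter (fun q => q.2 = p.2)).map (·.1)).foldl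
          (fun s2 idx => s2.set idx.toNat p.1) sl))
      (chunks.map g) =
    chunks.map (fun ch => mapping.foldl (fun w p => if p.2 = ch then p.1 else w) (g ch)) := by
  induction mapping generalizing g with
  | nil => simp
  | cons hd t ih =>
      rw [List.foldl_cons, write_positions_eq_map chunks g hd.2 hd.1,
        ih (fun ch => if ch = hd.2 then hd.1 else g ch)]
      apply List.map_congr_left
      intro ch _
      simp only [List.foldl_cons]
      congr 1
      by_cases h : hd.2 = ch
      · simp [h]
      · rw [if_neg h, if_neg (fun hc => h hc.symm)]

-- ===== VERDICT =====
theorem numbers_to_text_spec : Claim_equal_numbers_to_text := by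
  intro s mapping _
  show numbers_to_text s mapping = numbers_to_text_alt s mapping
  unfold numbers_to_text numbers_to_text_alt
  simp only [getD_invert_eq_scan mapping PySem.Dict.empty, PySem.Dict.getD_empty,
    getD_group_eq_filter, List.nil_append]
  rw [show List.replicate
        ((PySem.List.pyRange 0 ((s.toList.length : Int)) 4).map
          (fun i => String.ofList (PySem.List.slice s.toList (some i) (some (i + 4))))).length "" =
      ((PySem.List.pyRange 0 ((s.toList.length : Int)) 4).map
          (fun i => String.ofList (PySem.List.slice s.toList (some i) (some (i + 4))))).map
        (fun _ => "") from (List.map_const').symm,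
    sweep_eq_map_scan]
  simp only [List.map_map, List.filter_map]
  rw [PySem.List.foldl_append_ite (p := fun i =>
      (mapping.foldl (fun w p =>
        if p.2 = String.ofList (PySem.List.slice s.toList (some i) (some (i + 4))) then p.1 else w) "") ≠ "")]
  simp only [List.nil_append, Function.comp_def]
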